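-- pv_equiv track=rewrite | github.com/MrBrantCode/unitest_baseline | mut_generate/mist_train_cf/cf_91211/solution.py | generate_fibonacci_series
-- ===== SOURCE A (Python) =====
-- def generate_fibonacci_series(num_items):
--     series = [0, 1]
--     while len(series) < num_items:
--         next_number = series[-1] + series[-2]
--         series.append(next_number)
--     even_numbers = [num for num in series if num % 2 == 0]
--     even_sum = sum(even_numbers)
--     return series, even_sum
-- ===== SOURCE B (Python) =====
-- def generate_fibonacci_series(num_items):
--     # Rolling-pair generation (no negative indexing) + strided even sum:
--     # every third Fibonacci number (indices 0, 3, 6, ...) is even, so the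
--     # even sum is the sum of the stride-3 slice instead of a modulo filter.
--     a, b = 0, 1
--     series = [0, 1]
--     for _ in range(2, num_items):
--         a, b = b, a + b
--         series.append(b)
--     return series, sum(series[0::3])
-- ===== Notes on version B (the rewrite author's own statement) =====
-- stated objective: alternative
-- what changed: B generates terms from a rolling (a,b) pair over range(2,num_items) instead of negative-indexing the list in a while loop, and computes the even sum as sum(series[0::3]) (every third Fibonacci number is even) instead of a second modulo-filter pass.
import Mathlib
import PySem

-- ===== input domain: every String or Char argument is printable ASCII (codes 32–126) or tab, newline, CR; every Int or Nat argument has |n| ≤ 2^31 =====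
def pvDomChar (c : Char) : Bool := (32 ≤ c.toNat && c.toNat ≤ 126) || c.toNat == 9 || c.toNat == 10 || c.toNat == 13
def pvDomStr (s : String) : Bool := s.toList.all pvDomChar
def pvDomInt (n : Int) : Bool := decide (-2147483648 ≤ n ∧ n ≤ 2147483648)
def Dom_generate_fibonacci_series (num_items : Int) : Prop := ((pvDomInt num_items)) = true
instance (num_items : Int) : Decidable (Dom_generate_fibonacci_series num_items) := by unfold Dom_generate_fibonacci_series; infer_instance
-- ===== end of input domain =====

-- B replaces A's negative-indexing while loop by a rolling-pair for loop and A's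
-- modulo-filter even pass by the stride-3 slice sum (alternative decomposition, same cost).


-- ===== PORT A =====
-- A's while loop: append series[-1] + series[-2] while len(series) < num_items.
-- series always has length ≥ 2 (seeded [0, 1]), so the negative lookups never raise
-- and pyGetD's default 0 is never consulted.
def fibLoopA (series : List Int) (num_items : Int) : List Int :=
  if (series.length : Int) < num_items then
    fibLoopA (series ++ [PySem.List.pyGetD series (-1) 0 + PySem.List.pyGetD series (-2) 0]) num_items
  else series
termination_by (num_items - series.length).toNat
decreasing_by simp; omega

def generate_fibonacci_series (num_items : Int) : List Int × Int :=
  let series := fibLoopA [0, 1] num_items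
  let even_numbers := series.filter (fun num => PySem.Int.mod num 2 == 0)
  let even_sum := even_numbers.sum
  (series, even_sum)

-- ===== PORT B =====
-- B: for _ in range(2, num_items): a, b = b, a + b; series.append(b); then sum(series[0::3]).
-- slice? with step 3 never returns none (step ≠ 0), so getD [] is never consulted.
def generate_fibonacci_series_alt (num_items : Int) : List Int × Int :=
  let st := (PySem.List.pyRange 2 num_items 1).foldl
    (fun (st : Int × Int × List Int) _ =>
      (st.2.1, st.1 + st.2.1, st.2.2 ++ [st.1 + st.2.1]))
    (0, 1, [0, 1])
  (st.2.2, ((PySem.List.slice? st.2.2 (some 0) none 3).getD []).sum)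

-- ===== PRECONDITION & SPEC =====
def Spec_generate_fibonacci_series (num_items : Int) (out : List Int × Int) : Prop := out = generate_fibonacci_series_alt num_items
instance (num_items : Int) (out : List Int × Int) : Decidable (Spec_generate_fibonacci_series num_items out) := by unfold Spec_generate_fibonacci_series; infer_instance

-- ===== CLAIM (what is proved, stated in full; the proofs are below) =====
def Claim_equal_generate_fibonacci_series : Prop := ∀ (num_items : Int), Dom_generate_fibonacci_series num_items → Spec_generate_fibonacci_series num_items (generate_fibonacci_series num_items)

-- ===== LEMMAS AND PROOFS =====

def fib : Nat → Int
  | 0 => 0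
  | 1 => 1
  | n + 2 => fib n + fib (n + 1)

lemma fib_succ_succ (j : Nat) : fib (j + 2) = fib j + fib (j + 1) := by rw [fib]

lemma getD_fib1 (m : Nat) (h : 2 ≤ m) :
    PySem.List.pyGetD ((List.range m).map fib) (-1) 0 = fib (m - 1) := by
  rw [PySem.List.pyGetD_neg_ofNat _ 1 0 (by omega) (by simp; omega)]
  simp

lemma getD_fib2 (m : Nat) (h : 2 ≤ m) :
    PySem.List.pyGetD ((List.range m).map fib) (-2) 0 = fib (m - 2) := by
  rw [PySem.List.pyGetD_neg_ofNat _ 2 0 (by omega) (by simp; omega)]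
  simp

-- A's while loop, started on the first m Fibonacci numbers, yields the first m + (n - m)⁺ of them
lemma fibLoopA_eq (k : Nat) : ∀ (n : Int) (m : Nat), 2 ≤ m → k = (n - m).toNat →
    fibLoopA ((List.range m).map fib) n = (List.range (m + k)).map fib := by
  induction k with
  | zero =>
    intro n m hm hk
    rw [fibLoopA]
    simp at hk ⊢
    intro hlt; omega
  | succ k ih =>
    intro n m hm hk
    rw [fibLoopA]
    have hlt : ((((List.range m).map fib).length : Int) < n) := by simp; omega
    rw [if_pos hlt, getD_fib1 m hm, getD_fib2 m hm]
    have h2 : fib (m - 1) + fib (m - 2) = fib m := by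
      obtain ⟨j, rfl⟩ : ∃ j, m = j + 2 := ⟨m - 2, by omega⟩
      show fib (j + 1) + fib j = fib (j + 2)
      rw [fib]; ring
    have h3 : (List.range m).map fib ++ [fib (m - 1) + fib (m - 2)] = (List.range (m + 1)).map fib := by
      rw [h2, List.range_succ, List.map_append]; rfl
    rw [h3, ih n (m + 1) (by omega) (by omega)]
    have he : m + 1 + k = m + (k + 1) := by omega
    rw [he]

-- B's fold: the rolling (a, b) pair stays the last two Fibonacci numbers of the series
lemma foldB_eq (l : List Int) : ∀ (m : Nat), 2 ≤ m →
    l.foldl (fun (st : Int × Int × List Int) _ =>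
      (st.2.1, st.1 + st.2.1, st.2.2 ++ [st.1 + st.2.1]))
      (fib (m - 2), fib (m - 1), (List.range m).map fib)
    = (fib (m + l.length - 2), fib (m + l.length - 1), (List.range (m + l.length)).map fib) := by
  induction l with
  | nil => intro m hm; simp
  | cons x t ih =>
    intro m hm
    simp only [List.foldl_cons]
    have h2 : fib (m - 2) + fib (m - 1) = fib m := by
      obtain ⟨j, rfl⟩ : ∃ j, m = j + 2 := ⟨m - 2, by omega⟩
      simp [fib_succ_succ]
    have h3 : (List.range m).map fib ++ [fib (m - 2) + fib (m - 1)] = (List.range (m + 1)).map fib := by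
      rw [h2, List.range_succ, List.map_append]; rfl
    have h4 : fib (m - 1) = fib ((m + 1) - 2) := by congr 1
    show t.foldl _ (fib (m-1), fib (m-2) + fib (m-1), (List.range m).map fib ++ [fib (m-2) + fib (m-1)]) = _
    rw [h3, h2, h4]
    have h5 : fib m = fib ((m + 1) - 1) := by congr 1
    rw [h5, ih (m + 1) (by omega)]
    have e1 : m + 1 + t.length = m + (x :: t).length := by simp; omega
    rw [e1]

lemma fib_mod2_triple (q : Nat) :
    fib (3 * q) % 2 = 0 ∧ fib (3 * q + 1) % 2 = 1 ∧ fib (3 * q + 2) % 2 = 1 := by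
  induction q with
  | zero => decide
  | succ q ih =>
    obtain ⟨h0, h1, h2⟩ := ih
    have e : 3 * (q + 1) = 3 * q + 3 := by ring
    have f3 : fib (3 * q + 3) = fib (3 * q + 1) + fib (3 * q + 2) := fib_succ_succ (3 * q + 1)
    have f4 : fib (3 * q + 4) = fib (3 * q + 2) + fib (3 * q + 3) := fib_succ_succ (3 * q + 2)
    have f5 : fib (3 * q + 5) = fib (3 * q + 3) + fib (3 * q + 4) := fib_succ_succ (3 * q + 3)
    refine ⟨?_, ?_, ?_⟩
    · rw [e, f3]; omega
    · have : 3 * (q + 1) + 1 = 3 * q + 4 := by ring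
      rw [this, f4, f3]; omega
    · have : 3 * (q + 1) + 2 = 3 * q + 5 := by ring
      rw [this, f5, f4, f3]; omega

-- every third Fibonacci number is even, the other two of each triple are odd
lemma fib_mod2 (i : Nat) : PySem.Int.mod (fib i) 2 = if i % 3 = 0 then 0 else 1 := by
  rw [PySem.Int.mod_eq_emod_of_pos (by norm_num)]
  obtain ⟨q, r, hr, rfl⟩ : ∃ q r, r < 3 ∧ i = 3 * q + r := ⟨i / 3, i % 3, by omega, by omega⟩
  have := fib_mod2_triple q
  interval_cases r <;> simp <;> omega

lemma filter_range3 (N : Nat) :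
    (List.range N).filter (fun i => i % 3 == 0) = (List.range ((N + 2) / 3)).map (3 * ·) := by
  induction N with
  | zero => decide
  | succ N ih =>
    rw [List.range_succ, List.filter_append, ih]
    by_cases h : N % 3 = 0
    · have hc : ((N + 1) + 2) / 3 = (N + 2) / 3 + 1 := by omega
      rw [hc, List.range_succ, List.map_append]
      simp [h]
      omega
    · have hc : ((N + 1) + 2) / 3 = (N + 2) / 3 := by omega
      rw [hc]
      simp [h]

lemma slice3_eq (N : Nat) :
    (PySem.List.slice? ((List.range N).map fib) (some 0) none 3).getD []
      = (List.range ((N + 2) / 3)).map (fun k => fib (3 * k)) := by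
  rw [PySem.List.slice?]
  simp only [PySem.List.sliceIndices]
  norm_num
  have hc : (if 0 < N then (((N : Int) + 3 - 1) / 3).toNat else 0) = (N + 2) / 3 := by
    split_ifs with h <;> omega
  rw [hc]
  rw [List.filterMap_congr (g := (some ∘ (fun k => fib (3 * k))))
      (fun x hx => by
        have hx' : x < (N + 2) / 3 := List.mem_range.mp hx
        have h3 : 3 * x < N := by omega
        have ht : ((3 : Int) * (x : Int)).toNat = 3 * x := by omega
        rw [ht, List.getElem?_range h3]; rfl)]
  rw [List.filterMap_eq_map]

-- A's modulo-filter pass and B's stride-3 slice pick out the same elements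
lemma sums_eq (N : Nat) :
    (((List.range N).map fib).filter (fun num => PySem.Int.mod num 2 == 0)).sum
      = ((PySem.List.slice? ((List.range N).map fib) (some 0) none 3).getD []).sum := by
  rw [slice3_eq, List.filter_map]
  congr 1
  have hcg : (List.range N).filter ((fun num => PySem.Int.mod num 2 == 0) ∘ fib)
      = (List.range N).filter (fun i => i % 3 == 0) := by
    apply List.filter_congr
    intro i _
    simp only [Function.comp, fib_mod2 i]
    by_cases h : i % 3 = 0 <;> simp [h]
  rw [hcg, filter_range3, List.map_map]
  rfl

-- ===== VERDICT (by name: the statement is the Claim_ definition above) =====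
theorem generate_fibonacci_series_spec : Claim_equal_generate_fibonacci_series := by
  intro n _
  unfold Spec_generate_fibonacci_series generate_fibonacci_series generate_fibonacci_series_alt
  have hseed : ([0, 1] : List Int) = (List.range 2).map fib := by decide
  have hA : fibLoopA [0, 1] n = (List.range (2 + (n - 2).toNat)).map fib := by
    rw [hseed]; exact fibLoopA_eq (n - 2).toNat n 2 (by omega) rfl
  have hB : (PySem.List.pyRange 2 n 1).foldl
      (fun (st : Int × Int × List Int) _ =>
        (st.2.1, st.1 + st.2.1, st.2.2 ++ [st.1 + st.2.1]))
      (0, 1, [0, 1])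
      = (fib (2 + (n - 2).toNat - 2), fib (2 + (n - 2).toNat - 1),
         (List.range (2 + (n - 2).toNat)).map fib) := by
    have h0 : ((0 : Int), (1 : Int), ([0, 1] : List Int))
        = (fib (2 - 2), fib (2 - 1), (List.range 2).map fib) := by decide
    rw [h0, foldB_eq (PySem.List.pyRange 2 n 1) 2 (by omega),
        PySem.List.length_pyRange_one]
  simp only [hA, hB]
  exact congrArg _ (sums_eq (2 + (n - 2).toNat))
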